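-- pv_equiv track=rewrite | github.com/Rye-lxy/CasPeak | bin/main.py | preAssembler
-- ===== SOURCE A (Python) =====
-- def preAssembler(up, down):
--     while up or down:
--         if up and down:
--             upSeq = up.pop()
--             downSeq = down.pop()
--             title = ">{}+{}".format(upSeq[0], downSeq[0])
--             seq = upSeq[1] + downSeq[1]
--             yield "{}\n{}\n".format(title, seq)
--         elif up:
--             upSeq = up.pop()
--             title = ">{}".format(upSeq[0])
--             yield "{}\n{}\n".format(title, upSeq[1])
--         else:
--             downSeq = down.pop()
--             title = ">{}".format(downSeq[0])
--             yield "{}\n{}\n".format(title, downSeq[1])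
-- ===== SOURCE B (Python) =====
-- def preAssembler(up, down):
--     u = up[::-1]
--     d = down[::-1]
--     for (ui, us), (di, ds) in zip(u, d):
--         yield ">{}+{}\n{}{}\n".format(ui, di, us, ds)
--     for (i, s) in u[len(d):] + d[len(u):]:
--         yield ">{}\n{}\n".format(i, s)
-- ===== Notes on version B (the rewrite author's own statement) =====
-- stated objective: simpler
-- what changed: Replaced A's single while-loop with three pop/branch cases by a zip over the two reversed lists for the paired records followed by one loop over the leftover tail of the longer list; B also does not mutate its arguments (A drains both lists).
import Mathlib
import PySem

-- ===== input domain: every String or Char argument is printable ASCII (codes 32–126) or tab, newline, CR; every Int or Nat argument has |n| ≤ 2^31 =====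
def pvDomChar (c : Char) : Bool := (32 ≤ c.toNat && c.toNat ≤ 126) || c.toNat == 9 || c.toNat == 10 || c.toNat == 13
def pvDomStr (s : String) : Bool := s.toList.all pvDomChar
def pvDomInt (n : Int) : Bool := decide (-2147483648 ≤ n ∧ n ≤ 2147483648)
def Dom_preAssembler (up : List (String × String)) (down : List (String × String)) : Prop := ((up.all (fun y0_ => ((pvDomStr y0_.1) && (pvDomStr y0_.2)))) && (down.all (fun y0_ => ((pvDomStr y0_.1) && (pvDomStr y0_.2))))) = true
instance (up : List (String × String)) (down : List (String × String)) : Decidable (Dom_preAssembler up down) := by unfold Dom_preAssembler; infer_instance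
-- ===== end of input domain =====

-- B replaces A's branching pop loop by zip over the reversed lists plus a leftover loop (simpler);
-- equivalence is about the yielded sequence only: Python A drains (mutates) both argument lists, B does not.

-- ===== PORT A =====
-- A's while-loop popping from the end of both lists; yields collected as a List String.
def preAssembler (up : List (String × String)) (down : List (String × String)) : List String :=
  if h : up = [] ∧ down = [] then []
  else if hu : up = [] then
    -- Python's `else` branch: down is nonempty here
    have hd : down ≠ [] := fun hdn => h ⟨hu, hdn⟩
    let b := down.getLast hd
    (">" ++ b.1 ++ "\n" ++ b.2 ++ "\n") :: preAssembler up down.dropLast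
  else if hd : down = [] then
    -- Python's `elif up` branch
    let a := up.getLast hu
    (">" ++ a.1 ++ "\n" ++ a.2 ++ "\n") :: preAssembler up.dropLast down
  else
    -- Python's `if up and down` branch
    let a := up.getLast hu
    let b := down.getLast hd
    (">" ++ a.1 ++ "+" ++ b.1 ++ "\n" ++ a.2 ++ b.2 ++ "\n") :: preAssembler up.dropLast down.dropLast
termination_by up.length + down.length
decreasing_by
  · have := List.length_pos_iff.mpr (fun hdn => h ⟨hu, hdn⟩)
    simp [List.length_dropLast]; omega
  · have := List.length_pos_iff.mpr hu
    simp [List.length_dropLast]; omega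
  · have h1 := List.length_pos_iff.mpr hu
    have h2 := List.length_pos_iff.mpr hd
    simp [List.length_dropLast]; omega

-- ===== PORT B =====
def preAssembler_alt (up : List (String × String)) (down : List (String × String)) : List String :=
  let u := up.reverse
  let d := down.reverse
  (u.zip d).map (fun p => ">" ++ p.1.1 ++ "+" ++ p.2.1 ++ "\n" ++ p.1.2 ++ p.2.2 ++ "\n")
    ++ (u.drop d.length ++ d.drop u.length).map (fun q => ">" ++ q.1 ++ "\n" ++ q.2 ++ "\n")

-- ===== PRECONDITION & SPEC =====
def Spec_preAssembler (up : List (String × String)) (down : List (String × String)) (out : List String) : Prop := out = preAssembler_alt up down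
instance (up : List (String × String)) (down : List (String × String)) (out : List String) : Decidable (Spec_preAssembler up down out) := by unfold Spec_preAssembler; infer_instance

-- ===== CLAIM (what is proved, stated in full; the proofs are below) =====
def Claim_equal_preAssembler : Prop := ∀ (up : List (String × String)) (down : List (String × String)), Dom_preAssembler up down → Spec_preAssembler up down (preAssembler up down)

-- ===== LEMMAS AND PROOFS =====

-- proof-side cons-recursion over the reversed lists
def pvG (u d : List (String × String)) : List String :=
  match u, d with
  | [], [] => []
  | a :: u', b :: d' => (">" ++ a.1 ++ "+" ++ b.1 ++ "\n" ++ a.2 ++ b.2 ++ "\n") :: pvG u' d'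
  | a :: u', [] => (">" ++ a.1 ++ "\n" ++ a.2 ++ "\n") :: pvG u' []
  | [], b :: d' => (">" ++ b.1 ++ "\n" ++ b.2 ++ "\n") :: pvG [] d'

theorem rev_getLast_cons {α : Type} (l : List α) (h : l ≠ []) :
    l.reverse = l.getLast h :: l.dropLast.reverse := by
  conv_lhs => rw [← List.dropLast_append_getLast h]
  simp

theorem preAssembler_eq_pvG (up down : List (String × String)) :
    preAssembler up down = pvG up.reverse down.reverse := by
  fun_induction preAssembler up down with
  | case1 up down h =>
    obtain ⟨h1, h2⟩ := h; subst h1; subst h2; simp [pvG]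
  | case2 down h hd b ih =>
    rw [rev_getLast_cons down hd]
    simp only [pvG, List.reverse_nil, List.cons.injEq]
    exact ⟨rfl, ih⟩
  | case3 up hu a h ih =>
    rw [rev_getLast_cons up hu]
    simp only [pvG, List.reverse_nil, List.cons.injEq]
    exact ⟨rfl, ih⟩
  | case4 up down h hu hd a b ih =>
    rw [rev_getLast_cons up hu, rev_getLast_cons down hd]
    simp only [pvG, List.cons.injEq]
    exact ⟨rfl, ih⟩

theorem pvG_eq_zip (u d : List (String × String)) :
    pvG u d = (u.zip d).map (fun p => ">" ++ p.1.1 ++ "+" ++ p.2.1 ++ "\n" ++ p.1.2 ++ p.2.2 ++ "\n")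
      ++ (u.drop d.length ++ d.drop u.length).map (fun q => ">" ++ q.1 ++ "\n" ++ q.2 ++ "\n") := by
  induction u generalizing d with
  | nil =>
    induction d with
    | nil => simp [pvG]
    | cons b d' ihd => simp [pvG, ihd]
  | cons a u' ihu =>
    cases d with
    | nil =>
      have := ihu []
      simp [pvG] at this ⊢
      exact this
    | cons b d' => simp [pvG, ihu d']

-- ===== VERDICT (by name: the statement is the Claim_ definition above) =====
theorem preAssembler_spec : Claim_equal_preAssembler := by
  intro up down _
  unfold Spec_preAssembler preAssembler_alt
  rw [preAssembler_eq_pvG, pvG_eq_zip]
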